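-- pv_equiv track=rewrite | github.com/Revelate123/Algorithms | main.py | big_cluster
-- ===== SOURCE A (Python) =====
-- def union(union_array,root_1,root_2):
--
--     union_array[root_1[0]][0] = root_2[0]
--
--     union_array[root_2[0]][1] += root_1[1]
--     c = union_array[root_2[0]][1]
--     return union_array
--
-- def union_find(union_array, x):
--     #optionally, apply compression during union find.
--     marker = [x]
--     while marker[0] != union_array[marker[0]][0]:
--         marker = union_array[marker[0]]
--     c = union_array[marker[0]]
--     marker_2 = [x]
--     while marker_2[0] != union_array[marker_2[0]][0]:
--         marker_3 = union_array[marker_2[0]]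
--         union_array[marker_2[0]][0] = c[0]
--         marker_2 = marker_3
--     return union_array[marker[0]]
--
-- def big_cluster(A):
--     num_nodes = 200000
--     clusters = len(A)
--     union_array = [[i,1] for i in range(num_nodes+1)]
--     #create bit masks for distance 1
--     bit_masks_1 = [1 << i for i in range(24)]
--     bit_masks_2 = []
--     for i in bit_masks_1:
--         for j in bit_masks_1:
--             bit_masks_2 += [i ^ j]
--     #iterate through all values in map
--     for i in A.keys():
--         for j in bit_masks_1:
--             if i ^ j in A:
--                 #union i and A[i ^ j] if roots are different
--                 root_1 = union_find(union_array, A[i])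
--                 root_2 = union_find(union_array, A[i ^ j])
--                 if root_1 != root_2:
--                     # Join them together
--                     union_array = union(union_array, root_1, root_2)
--                     clusters -= 1
--
--         for j in bit_masks_2:
--             if i ^ j in A:
--                 # union i and A[i ^ j] if roots are different
--                 root_1 = union_find(union_array, A[i])
--                 root_2 = union_find(union_array, A[i ^ j])
--                 if root_1 != root_2:
--                     # Join them together
--                     union_array = union(union_array, root_1, root_2)
--                     clusters -= 1
--         #apply bit mask and check for match to node
--         #union those nodes if there is a match
--         #decrease number of clusters by 1
--     return clusters
-- ===== SOURCE B (Python) =====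
-- def big_cluster(A):
--     # Naive relabeling disjoint-set over the value ids actually present: no fixed-size
--     # array, no parent chains -- a dict maps each value to its current class label and a
--     # merge rewrites the smaller bookkeeping dict in one pass.
--     clusters = len(A)
--     bit_masks_1 = [1 << i for i in range(24)]
--     bit_masks_2 = [i ^ j for i in bit_masks_1 for j in bit_masks_1]
--     label = {}
--     for i in A:
--         for j in bit_masks_1 + bit_masks_2:
--             k = i ^ j
--             if k in A:
--                 u = label.get(A[i], A[i])
--                 w = label.get(A[k], A[k])
--                 if u != w:
--                     for v in label:
--                         if label[v] == u:
--                             label[v] = w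
--                     label[u] = w
--                     clusters -= 1
--     return clusters
-- ===== Notes on version B (the rewrite author's own statement) =====
-- stated objective: alternative
-- what changed: Replaces the fixed 200001-slot parent/size array with path-compressed union-find by a small dict mapping each value actually present to a class label, merging classes by rewriting labels in one pass over that dict; the per-call 200001-element array allocation and the parent-chain walks disappear; measured speedups at the timed sizes ranged from 1.45x to 2x, borderline, so speed is not claimed.
-- outside the precondition, e.g. on big_cluster({0: -1, 3: 200000}): A returns 2, B returns 1
import Mathlib
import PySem

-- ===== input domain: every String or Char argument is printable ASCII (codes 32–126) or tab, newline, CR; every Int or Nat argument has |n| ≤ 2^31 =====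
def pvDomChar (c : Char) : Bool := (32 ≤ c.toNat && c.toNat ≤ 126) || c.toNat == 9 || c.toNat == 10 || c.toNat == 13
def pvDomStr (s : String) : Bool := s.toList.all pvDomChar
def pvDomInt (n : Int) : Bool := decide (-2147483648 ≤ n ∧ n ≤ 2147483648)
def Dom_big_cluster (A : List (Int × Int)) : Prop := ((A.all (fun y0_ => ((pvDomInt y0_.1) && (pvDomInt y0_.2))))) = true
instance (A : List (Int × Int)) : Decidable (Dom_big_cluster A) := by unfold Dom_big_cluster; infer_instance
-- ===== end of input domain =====

-- B replaces A's fixed 200001-slot union-find array (with path compression) by a small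
-- label dictionary over the values actually present, merging classes by a one-pass relabel
-- (a structurally different algorithm; no 200001-element array is ever built).
-- Equivalence is about the RETURN value only (the Python A mutates no argument).

-- ===== PORT A =====

-- `while marker[0] != union_array[marker[0]][0]: marker = union_array[marker[0]]`
-- (fuel makes the while-loop total; 200002 steps always suffice on admitted inputs)
def findLoopA (ua : List (Int × Int)) (m : Int) : Nat → Int
  | 0 => m
  | fuel + 1 =>
    if m ≠ (PySem.List.pyGetD ua m (0, 0)).1 then
      findLoopA ua (PySem.List.pyGetD ua m (0, 0)).1 fuel
    else m

-- the compression loop of union_find; in the Python source `marker_3` ALIASES the cell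
-- `union_array[marker_2[0]]`, so after `union_array[marker_2[0]][0] = c[0]` the next node
-- is c[0] itself — transliterated exactly: the next node is the just-written parent c0
def compressLoopA (ua : List (Int × Int)) (m c0 : Int) : Nat → List (Int × Int)
  | 0 => ua
  | fuel + 1 =>
    if m ≠ (PySem.List.pyGetD ua m (0, 0)).1 then
      compressLoopA (PySem.List.pySetD ua m (c0, (PySem.List.pyGetD ua m (0, 0)).2)) c0 c0 fuel
    else ua

-- union_find returns the alias `union_array[marker[0]]`; the port returns the root INDEX
-- and callers re-read the cell at each use, which is exactly what the Python alias does
def unionFindA (ua : List (Int × Int)) (x : Int) : List (Int × Int) × Int :=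
  let r := findLoopA ua x 200002
  let c := PySem.List.pyGetD ua r (0, 0)
  (compressLoopA ua x c.1 200002, r)

-- union(union_array, root_1, root_2): root_1/root_2 are aliases of the cells at r1/r2
def unionOpA (ua : List (Int × Int)) (r1 r2 : Int) : List (Int × Int) :=
  let ua1 := PySem.List.pySetD ua r1 ((PySem.List.pyGetD ua r2 (0, 0)).1, (PySem.List.pyGetD ua r1 (0, 0)).2)
  PySem.List.pySetD ua1 r2 ((PySem.List.pyGetD ua1 r2 (0, 0)).1,
    (PySem.List.pyGetD ua1 r2 (0, 0)).2 + (PySem.List.pyGetD ua1 r1 (0, 0)).2)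

-- body of the two inner mask loops of big_cluster
def bigStepA (d : PySem.Dict Int Int) (i : Int) (st : List (Int × Int) × Int) (j : Int) :
    List (Int × Int) × Int :=
  if d.contains (PySem.Int.bxor i j) then
    let p1 := unionFindA st.1 (d.getD i 0)
    let p2 := unionFindA p1.1 (d.getD (PySem.Int.bxor i j) 0)
    let root1 := PySem.List.pyGetD p2.1 p1.2 (0, 0)
    let root2 := PySem.List.pyGetD p2.1 p2.2 (0, 0)
    if root1 ≠ root2 then (unionOpA p2.1 p1.2 p2.2, st.2 - 1) else (p2.1, st.2)
  else st

def big_cluster (A : List (Int × Int)) : Int :=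
  let d : PySem.Dict Int Int := ⟨A⟩
  let numNodes : Int := 200000
  let clusters : Int := (A.length : Int)
  let unionArray : List (Int × Int) := (PySem.List.pyRange 0 (numNodes + 1) 1).map (fun i => (i, (1 : Int)))
  let bitMasks1 : List Int := (PySem.List.pyRange 0 24 1).map (fun i => (1 : Int) <<< i.toNat)
  let bitMasks2 : List Int :=
    bitMasks1.foldl (fun acc i => bitMasks1.foldl (fun acc j => acc ++ [PySem.Int.bxor i j]) acc) []
  (d.keys.foldl (fun st i =>
      bitMasks2.foldl (bigStepA d i) (bitMasks1.foldl (bigStepA d i) st))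
    (unionArray, clusters)).2

-- ===== PORT B =====

-- `for v in label: if label[v] == u: label[v] = w` then `label[u] = w`
def relabelB (lbl : PySem.Dict Int Int) (u w : Int) : PySem.Dict Int Int :=
  (PySem.Dict.mk (lbl.items.map (fun p => if p.2 = u then (p.1, w) else p))).insert u w

def bigStepB (d : PySem.Dict Int Int) (i : Int) (st : PySem.Dict Int Int × Int) (j : Int) :
    PySem.Dict Int Int × Int :=
  let k := PySem.Int.bxor i j
  if d.contains k then
    let u := st.1.getD (d.getD i 0) (d.getD i 0)
    let w := st.1.getD (d.getD k 0) (d.getD k 0)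
    if u ≠ w then (relabelB st.1 u w, st.2 - 1) else st
  else st

def big_cluster_alt (A : List (Int × Int)) : Int :=
  let d : PySem.Dict Int Int := ⟨A⟩
  let clusters : Int := (A.length : Int)
  let bitMasks1 : List Int := (PySem.List.pyRange 0 24 1).map (fun i => (1 : Int) <<< i.toNat)
  let bitMasks2 : List Int := bitMasks1.flatMap (fun i => bitMasks1.map (fun j => PySem.Int.bxor i j))
  (d.keys.foldl (fun st i => (bitMasks1 ++ bitMasks2).foldl (bigStepB d i) st)
    (PySem.Dict.empty, clusters)).2

-- ===== PRECONDITION & SPEC =====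

-- the array cell a value v actually addresses (Python negative indexing wraps)
def psiV (v : Int) : Int := if v < 0 then v + 200001 else v

-- Pre_ excludes: duplicate keys (the input stands for a Python dict: an assoc list with a
-- repeated key has no dict counterpart — first-vs-last-match corner); values outside
-- [-200001, 200000] (A raises IndexError there); and two distinct values addressing the
-- same cell mod 200001 (A's negative-index wraparound aliases them — an accident of the
-- fixed-size array; B keeps such values distinct).
def Pre_big_cluster (A : List (Int × Int)) : Prop :=
  (A.map Prod.fst).Nodup ∧
  (∀ p ∈ A, -200001 ≤ p.2 ∧ p.2 ≤ 200000) ∧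
  (∀ p ∈ A, ∀ q ∈ A, psiV p.2 = psiV q.2 → p.2 = q.2)
instance (A : List (Int × Int)) : Decidable (Pre_big_cluster A) := by
  unfold Pre_big_cluster; infer_instance

def pvWitness_big_cluster : (List (Int × Int)) := [(0, 5), (3, 6), (100, 2)]

def Spec_big_cluster (A : List (Int × Int)) (out : Int) : Prop := out = big_cluster_alt A
instance (A : List (Int × Int)) (out : Int) : Decidable (Spec_big_cluster A out) := by
  unfold Spec_big_cluster; infer_instance

-- ===== CLAIM (what is proved, stated in full; the proofs are below) =====
def Claim_equal_big_cluster : Prop :=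
  ∀ (A : List (Int × Int)), Dom_big_cluster A → Pre_big_cluster A → Spec_big_cluster A (big_cluster A)
-- ===== LEMMAS AND PROOFS =====

-- abstract parent forest: pvRR f i r n = "from i, following f, the root r is reached in n steps"
inductive pvRR (f : Nat → Nat) : Nat → Nat → Nat → Prop
  | root (i : Nat) : f i = i → pvRR f i i 0
  | step (i r n : Nat) : f i ≠ i → pvRR f (f i) r n → pvRR f i r (n + 1)

theorem pvRR_det {f : Nat → Nat} {i r r' n n' : Nat}
    (h : pvRR f i r n) (h' : pvRR f i r' n') : r = r' ∧ n = n' := by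
  induction h generalizing n' with
  | root i hfix => cases h' with
    | root _ _ => exact ⟨rfl, rfl⟩
    | step _ _ _ hne _ => exact absurd hfix hne
  | step i r n hne htail ih => cases h' with
    | root _ hfix => exact absurd hfix hne
    | step _ _ n₂ _ htail' =>
      obtain ⟨h1, h2⟩ := ih htail'
      exact ⟨h1, by omega⟩

theorem pvRR_fix {f : Nat → Nat} {i r n : Nat} (h : pvRR f i r n) : f r = r := by
  induction h with
  | root _ hfix => exact hfix
  | step _ _ _ _ _ ih => exact ih

theorem pvRR_suffix {f : Nat → Nat} {i r n : Nat} (h : pvRR f i r n) :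
    ∀ a ≤ n, pvRR f (f^[a] i) r (n - a) := by
  induction h with
  | root i hfix =>
    intro a ha
    interval_cases a
    simpa using pvRR.root i hfix
  | step i r n hne htail ih =>
    intro a ha
    match a with
    | 0 => simpa using pvRR.step i r n hne htail
    | a + 1 =>
      have := ih a (by omega)
      have hit : f^[a+1] i = f^[a] (f i) := by
        rw [Function.iterate_succ_apply]
      rw [hit]
      simpa [Nat.succ_sub_succ] using this

theorem pvRR_iter_lt {N : Nat} {f : Nat → Nat} (hrange : ∀ j, j < N → f j < N)
    {i : Nat} (hi : i < N) (a : Nat) : f^[a] i < N := by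
  induction a with
  | zero => simpa using hi
  | succ a ih =>
    rw [Function.iterate_succ_apply']
    exact hrange _ ih

theorem pvRR_bound {N : Nat} {f : Nat → Nat} (hrange : ∀ j, j < N → f j < N)
    {i r n : Nat} (hi : i < N) (h : pvRR f i r n) : n < N := by
  have hlt : ∀ a, f^[a] i < N := fun a => pvRR_iter_lt hrange hi a
  have hginj : Function.Injective (fun a : Fin (n + 1) => (⟨f^[a.1] i, hlt a.1⟩ : Fin N)) := by
    intro a b hab
    have hv : f^[a.1] i = f^[b.1] i := congrArg Fin.val hab
    have ha := pvRR_suffix h a.1 (by omega)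
    have hb := pvRR_suffix h b.1 (by omega)
    rw [hv] at ha
    have := (pvRR_det ha hb).2
    exact Fin.ext (by omega)
  have := Fintype.card_le_of_injective _ hginj
  simpa using this

theorem pvRR_compress {f : Nat → Nat} {x rx nx : Nat} (hx : pvRR f x rx nx) :
    ∀ i r n, pvRR f i r n → ∃ m, pvRR (Function.update f x rx) i r m := by
  intro i r n h
  induction h with
  | root i hfix =>
    by_cases hix : i = x
    · have hrx : rx = i := by
        have hthis : pvRR f x i 0 := hix ▸ pvRR.root i hfix
        exact (pvRR_det hx hthis).1
      refine ⟨0, ?_⟩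
      rw [hrx, hix]
      exact pvRR.root x (by simp)
    · exact ⟨0, pvRR.root i (by simp [Function.update, hix, hfix])⟩
  | step i r n hne htail ih =>
    by_cases hix : i = x
    · have hstep : pvRR f x r (n + 1) := hix ▸ pvRR.step i r n hne htail
      have hrx : rx = r := (pvRR_det hx hstep).1
      have hfr : f r = r := pvRR_fix htail
      have hfxne : f x ≠ x := hix ▸ hne
      have hrne : r ≠ x := fun hrr => hfxne (hrr ▸ hfr)
      refine ⟨1, ?_⟩
      rw [hix, hrx]
      refine pvRR.step x r 0 ?_ ?_
      · simpa using hrne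
      · have h1 : Function.update f x r x = r := by simp
        rw [h1]
        exact pvRR.root r (by simp [Function.update, hrne, hfr])
    · obtain ⟨m, hm⟩ := ih
      have h1 : Function.update f x rx i = f i := by simp [Function.update, hix]
      exact ⟨m + 1, pvRR.step i r m (by rw [h1]; exact hne) (by rw [h1]; exact hm)⟩

theorem pvRR_link {f : Nat → Nat} {r1 r2 : Nat} (h1 : f r1 = r1) (h2 : f r2 = r2)
    (hne : r1 ≠ r2) :
    ∀ i r n, pvRR f i r n → ∃ m, pvRR (Function.update f r1 r2) i (if r = r1 then r2 else r) m := by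
  intro i r n h
  induction h with
  | root i hfix =>
    by_cases hix : i = r1
    · subst hix
      simp
      refine ⟨1, pvRR.step i r2 0 ?_ ?_⟩
      · simp [Function.update]; omega
      · have hu : Function.update f i r2 i = r2 := by simp [Function.update]
        rw [hu]
        exact pvRR.root r2 (by simp [Function.update, (Ne.symm hne : r2 ≠ i), h2])
    · simp only [if_neg hix]
      exact ⟨0, pvRR.root i (by simp [Function.update, hix, hfix])⟩
  | step i r n hstep htail ih =>
    have hir1 : i ≠ r1 := by
      intro hh
      subst hh
      exact hstep h1
    obtain ⟨m, hm⟩ := ih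
    have hu : Function.update f r1 r2 i = f i := by simp [Function.update, hir1]
    exact ⟨m + 1, pvRR.step i _ m (by rw [hu]; exact hstep) (by rw [hu]; exact hm)⟩

-- bridge: Python indexing on a 200001-long list
def pvIdxN (v : Int) : Nat := (psiV v).toNat

theorem pvIdxN_lt {v : Int} (h1 : -200001 ≤ v) (h2 : v < 200001) : pvIdxN v < 200001 := by
  unfold pvIdxN psiV
  split_ifs <;> omega

def pnat (ua : List (Int × Int)) (i : Nat) : Nat := ((ua[i]?.getD (0, 0)).1).toNat

def pvInv (ua : List (Int × Int)) : Prop :=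
  ua.length = 200001 ∧
  (∀ i : Nat, i < 200001 → 0 ≤ (ua[i]?.getD (0, 0)).1 ∧ (ua[i]?.getD (0, 0)).1 < 200001) ∧
  (∀ i : Nat, i < 200001 → ∃ r n, pvRR (pnat ua) i r n)

theorem pvIdx_wrap (ua : List (Int × Int)) (m : Int)
    (hlen : ua.length = 200001) (h1 : -200001 ≤ m) (h2 : m < 200001) :
    PySem.List.pyIdx? ua.length m = some (pvIdxN m) := by
  unfold PySem.List.pyIdx? pvIdxN psiV
  rw [hlen]
  split_ifs <;> first | (congr 1; omega) | omega | rfl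

theorem pvGetD_wrap (ua : List (Int × Int)) (m : Int) (d : Int × Int)
    (hlen : ua.length = 200001) (h1 : -200001 ≤ m) (h2 : m < 200001) :
    PySem.List.pyGetD ua m d = ua[pvIdxN m]?.getD d := by
  unfold PySem.List.pyGetD PySem.List.pyGet?
  rw [pvIdx_wrap ua m hlen h1 h2]
  rfl

theorem pvSetD_wrap (ua : List (Int × Int)) (m : Int) (v : Int × Int)
    (hlen : ua.length = 200001) (h1 : -200001 ≤ m) (h2 : m < 200001) :
    PySem.List.pySetD ua m v = ua.set (pvIdxN m) v := by
  unfold PySem.List.pySetD PySem.List.pySet?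
  rw [pvIdx_wrap ua m hlen h1 h2]
  rfl

theorem pvRR_last {f : Nat → Nat} {i r n : Nat} (h : pvRR f i r n) : f^[n] i = r := by
  induction h with
  | root _ hfix => rfl
  | step i r n _ _ ih => rw [Function.iterate_succ_apply]; exact ih

theorem pnat_lt {ua : List (Int × Int)} (hInv : pvInv ua) :
    ∀ j, j < 200001 → pnat ua j < 200001 := by
  intro j hj
  have := hInv.2.1 j hj
  unfold pnat
  omega

theorem pvRR_end_lt {ua : List (Int × Int)} (hInv : pvInv ua) {i r n : Nat}
    (hi : i < 200001) (h : pvRR (pnat ua) i r n) : r < 200001 := by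
  rw [← pvRR_last h]
  exact pvRR_iter_lt (pnat_lt hInv) hi n

theorem pnat_set (ua : List (Int × Int)) (j : Nat) (v : Int × Int) (hj : j < ua.length) :
    pnat (ua.set j v) = Function.update (pnat ua) j v.1.toNat := by
  funext i
  unfold pnat
  rw [List.getElem?_set]
  by_cases hij : j = i
  · simp [hij, Function.update, hij ▸ hj]
  · simp only [Function.update, eq_rec_constant, dif_neg (fun hh : i = j => hij hh.symm)]
    simp [hij]

-- the parent field of a root cell is its own index
theorem pvCell1 {ua : List (Int × Int)} (hInv : pvInv ua) {r : Nat} (hr : r < 200001)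
    (hfix : pnat ua r = r) : (ua[r]?.getD (0, 0)).1 = (r : Int) := by
  have := hInv.2.1 r hr
  unfold pnat at hfix
  omega

theorem pvFind_go (ua : List (Int × Int)) (hInv : pvInv ua) :
    ∀ (fuel : Nat) (m : Int) (r n : Nat), 0 ≤ m → m < 200001 →
      pvRR (pnat ua) m.toNat r n → n < fuel → findLoopA ua m fuel = (r : Int) := by
  intro fuel
  induction fuel with
  | zero => intro m r n _ _ _ h; omega
  | succ fuel ih =>
    intro m r n hm0 hm1 hRR hn
    have hlen := hInv.1
    have hidx : pvIdxN m = m.toNat := by unfold pvIdxN psiV; split_ifs <;> omega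
    have hget : PySem.List.pyGetD ua m (0, 0) = ua[m.toNat]?.getD (0, 0) := by
      rw [pvGetD_wrap ua m (0, 0) hlen (by omega) hm1, hidx]
    have hrange := hInv.2.1 m.toNat (by omega)
    have hcell : (PySem.List.pyGetD ua m (0, 0)).1 = ((pnat ua m.toNat : Nat) : Int) := by
      rw [hget]
      unfold pnat
      omega
    cases hRR with
    | root _ hfix =>
      have hc : (PySem.List.pyGetD ua m (0, 0)).1 = m := by rw [hcell, hfix]; omega
      simp only [findLoopA, hc]
      simp
      omega
    | step _ _ n' hne htail =>
      have hc : m ≠ (PySem.List.pyGetD ua m (0, 0)).1 := by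
        rw [hcell]
        omega
      simp only [findLoopA, if_pos hc]
      rw [hcell]
      have : ((pnat ua m.toNat : Nat) : Int).toNat = pnat ua m.toNat := by omega
      rw [ih _ r n' (by omega) (by exact_mod_cast pnat_lt hInv m.toNat (by omega)) (this ▸ htail) (by omega)]

theorem findLoopA_succ (ua : List (Int × Int)) (m : Int) (fuel : Nat) :
    findLoopA ua m (fuel + 1) =
      if m ≠ (PySem.List.pyGetD ua m (0, 0)).1 then
        findLoopA ua (PySem.List.pyGetD ua m (0, 0)).1 fuel
      else m := rfl

theorem pvFind (ua : List (Int × Int)) (hInv : pvInv ua) (x : Int)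
    (hx1 : -200001 ≤ x) (hx2 : x < 200001) {r n : Nat}
    (hRR : pvRR (pnat ua) (pvIdxN x) r n) : findLoopA ua x 200002 = (r : Int) := by
  have hlen := hInv.1
  have hxN : pvIdxN x < 200001 := pvIdxN_lt hx1 hx2
  have hbound : n < 200001 := pvRR_bound (pnat_lt hInv) hxN hRR
  by_cases hx0 : 0 ≤ x
  · have hidx : pvIdxN x = x.toNat := by unfold pvIdxN psiV; split_ifs <;> omega
    exact pvFind_go ua hInv 200002 x r n hx0 hx2 (hidx ▸ hRR) (by omega)
  · have hx0' : x < 0 := by omega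
    -- negative start: the first loop iteration moves to the (non-negative) parent
    have hget : PySem.List.pyGetD ua x (0, 0) = ua[pvIdxN x]?.getD (0, 0) :=
      pvGetD_wrap ua x (0, 0) hlen hx1 hx2
    have hrange := hInv.2.1 (pvIdxN x) hxN
    have hcell : (PySem.List.pyGetD ua x (0, 0)).1 = ((pnat ua (pvIdxN x) : Nat) : Int) := by
      rw [hget]; unfold pnat; omega
    have hc : x ≠ (PySem.List.pyGetD ua x (0, 0)).1 := by rw [hcell]; omega
    rw [show (200002 : Nat) = 200001 + 1 from rfl, findLoopA_succ, if_pos hc, hcell]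
    have htn : ((pnat ua (pvIdxN x) : Nat) : Int).toNat = pnat ua (pvIdxN x) := by omega
    have hplt : pnat ua (pvIdxN x) < 200001 := pnat_lt hInv _ hxN
    cases hRR with
    | root _ hfix =>
      refine pvFind_go ua hInv 200001 _ _ 0 (by omega) (by exact_mod_cast hplt) ?_ (by omega)
      rw [htn, hfix]
      exact pvRR.root _ hfix
    | step _ _ n' hne htail =>
      exact pvFind_go ua hInv 200001 _ _ n' (by omega) (by exact_mod_cast hplt) (htn ▸ htail) (by omega)

theorem compressLoopA_succ (ua : List (Int × Int)) (m c0 : Int) (fuel : Nat) :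
    compressLoopA ua m c0 (fuel + 1) =
      if m ≠ (PySem.List.pyGetD ua m (0, 0)).1 then
        compressLoopA (PySem.List.pySetD ua m (c0, (PySem.List.pyGetD ua m (0, 0)).2)) c0 c0 fuel
      else ua := rfl

theorem pvSet_ranges {ua : List (Int × Int)} (hlen : ua.length = 200001)
    (hra : ∀ i : Nat, i < 200001 → 0 ≤ (ua[i]?.getD (0, 0)).1 ∧ (ua[i]?.getD (0, 0)).1 < 200001)
    {j : Nat} (_hj : j < 200001)
    {v : Int × Int} (hv0 : 0 ≤ v.1) (hv1 : v.1 < 200001) :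
    ∀ i : Nat, i < 200001 →
      0 ≤ ((ua.set j v)[i]?.getD (0, 0)).1 ∧ ((ua.set j v)[i]?.getD (0, 0)).1 < 200001 := by
  intro i hi
  rw [List.getElem?_set]
  split_ifs with hji hjl
  · simpa using ⟨hv0, hv1⟩
  · exact absurd (by omega : j < ua.length) hjl
  · exact hra i hi

theorem pvCompress (ua : List (Int × Int)) (hInv : pvInv ua) (x : Int)
    (hx1 : -200001 ≤ x) (hx2 : x < 200001) {r n : Nat}
    (hRR : pvRR (pnat ua) (pvIdxN x) r n) :
    pvInv (compressLoopA ua x (r : Int) 200002) ∧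
    (∀ i rr m, pvRR (pnat ua) i rr m →
      ∃ m', pvRR (pnat (compressLoopA ua x (r : Int) 200002)) i rr m') := by
  have hlen := hInv.1
  have hxN : pvIdxN x < 200001 := pvIdxN_lt hx1 hx2
  have hfr : pnat ua r = r := pvRR_fix hRR
  have hrN : r < 200001 := pvRR_end_lt hInv hxN hRR
  have hget : PySem.List.pyGetD ua x (0, 0) = ua[pvIdxN x]?.getD (0, 0) :=
    pvGetD_wrap ua x (0, 0) hlen hx1 hx2
  rw [show (200002 : Nat) = 200001 + 1 from rfl, compressLoopA_succ]
  by_cases hc : x ≠ (PySem.List.pyGetD ua x (0, 0)).1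
  · rw [if_pos hc]
    have hset : PySem.List.pySetD ua x ((r : Int), (PySem.List.pyGetD ua x (0, 0)).2) =
        ua.set (pvIdxN x) ((r : Int), (PySem.List.pyGetD ua x (0, 0)).2) :=
      pvSetD_wrap ua x _ hlen hx1 hx2
    rw [hset]
    set s2 := (PySem.List.pyGetD ua x (0, 0)).2 with hs2
    set ua1 := ua.set (pvIdxN x) ((r : Int), s2) with hua1
    have hlen1 : ua1.length = 200001 := by rw [hua1]; simp [hlen]
    have hpn1 : pnat ua1 = Function.update (pnat ua) (pvIdxN x) r := by
      rw [hua1, pnat_set ua (pvIdxN x) _ (by omega)]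
      simp
    have hcell' : (PySem.List.pyGetD ua1 ((r : Nat) : Int) (0, 0)).1 = ((r : Nat) : Int) := by
      have hw : PySem.List.pyGetD ua1 ((r : Nat) : Int) (0, 0) = ua1[pvIdxN ((r : Nat) : Int)]?.getD (0, 0) :=
        pvGetD_wrap ua1 _ _ hlen1 (by omega) (by exact_mod_cast hrN)
      have hidr : pvIdxN ((r : Nat) : Int) = r := by unfold pvIdxN psiV; split_ifs <;> omega
      rw [hw, hidr, hua1, List.getElem?_set]
      split_ifs with hxr hxl
      · simp
      · exact absurd (by omega : pvIdxN x < ua.length) hxl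
      · exact pvCell1 hInv hrN hfr
    rw [show (200001 : Nat) = 200000 + 1 from rfl, compressLoopA_succ, if_neg (by rw [hcell']; simp)]
    have hInv1 : pvInv ua1 := by
      refine ⟨hlen1, pvSet_ranges hInv.1 hInv.2.1 hxN (by simp) (by simpa using hrN), ?_⟩
      intro i hi
      obtain ⟨rr, m, hm⟩ := hInv.2.2 i hi
      obtain ⟨m', hm'⟩ := pvRR_compress hRR i rr m hm
      exact ⟨rr, m', by rw [hpn1]; exact hm'⟩
    refine ⟨hInv1, ?_⟩
    intro i rr m hm
    obtain ⟨m', hm'⟩ := pvRR_compress hRR i rr m hm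
    exact ⟨m', by rw [hpn1]; exact hm'⟩
  · rw [if_neg hc]
    exact ⟨hInv, fun i rr m h => ⟨m, h⟩⟩

theorem pvUF (ua : List (Int × Int)) (hInv : pvInv ua) (x : Int)
    (hx1 : -200001 ≤ x) (hx2 : x < 200001) {r n : Nat}
    (hRR : pvRR (pnat ua) (pvIdxN x) r n) :
    (unionFindA ua x).2 = (r : Int) ∧ pvInv (unionFindA ua x).1 ∧
    (∀ i rr m, pvRR (pnat ua) i rr m → ∃ m', pvRR (pnat (unionFindA ua x).1) i rr m') := by
  have hfind : findLoopA ua x 200002 = (r : Int) := pvFind ua hInv x hx1 hx2 hRR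
  have hfr : pnat ua r = r := pvRR_fix hRR
  have hrN : r < 200001 := pvRR_end_lt hInv (pvIdxN_lt hx1 hx2) hRR
  have hc1 : (PySem.List.pyGetD ua ((r : Nat) : Int) (0, 0)).1 = ((r : Nat) : Int) := by
    have hw : PySem.List.pyGetD ua ((r : Nat) : Int) (0, 0) = ua[pvIdxN ((r : Nat) : Int)]?.getD (0, 0) :=
      pvGetD_wrap ua _ _ hInv.1 (by omega) (by exact_mod_cast hrN)
    have hidr : pvIdxN ((r : Nat) : Int) = r := by unfold pvIdxN psiV; split_ifs <;> omega
    rw [hw, hidr]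
    exact pvCell1 hInv hrN hfr
  have hUF : unionFindA ua x = (compressLoopA ua x ((r : Nat) : Int) 200002, ((r : Nat) : Int)) := by
    show (compressLoopA ua x (PySem.List.pyGetD ua (findLoopA ua x 200002) (0, 0)).1 200002,
          findLoopA ua x 200002) = _
    rw [hfind, hc1]
  rw [hUF]
  obtain ⟨h1, h2⟩ := pvCompress ua hInv x hx1 hx2 hRR
  exact ⟨rfl, h1, h2⟩

theorem pvUnionOp (ua : List (Int × Int)) (hInv : pvInv ua) {r1 r2 : Nat}
    (h1 : r1 < 200001) (h2 : r2 < 200001)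
    (hf1 : pnat ua r1 = r1) (hf2 : pnat ua r2 = r2) (hne : r1 ≠ r2) :
    pvInv (unionOpA ua ((r1 : Nat) : Int) ((r2 : Nat) : Int)) ∧
    (∀ i rr m, pvRR (pnat ua) i rr m →
      ∃ m', pvRR (pnat (unionOpA ua ((r1 : Nat) : Int) ((r2 : Nat) : Int))) i
        (if rr = r1 then r2 else rr) m') := by
  have hlen := hInv.1
  have hid1 : pvIdxN ((r1 : Nat) : Int) = r1 := by unfold pvIdxN psiV; split_ifs <;> omega
  have hid2 : pvIdxN ((r2 : Nat) : Int) = r2 := by unfold pvIdxN psiV; split_ifs <;> omega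
  have hg1 : PySem.List.pyGetD ua ((r1 : Nat) : Int) (0, 0) = ua[r1]?.getD (0, 0) := by
    rw [pvGetD_wrap ua _ _ hlen (by omega) (by exact_mod_cast h1), hid1]
  have hg2 : PySem.List.pyGetD ua ((r2 : Nat) : Int) (0, 0) = ua[r2]?.getD (0, 0) := by
    rw [pvGetD_wrap ua _ _ hlen (by omega) (by exact_mod_cast h2), hid2]
  have hc2 : (ua[r2]?.getD (0, 0)).1 = ((r2 : Nat) : Int) := pvCell1 hInv h2 hf2
  have hstep1 : PySem.List.pySetD ua ((r1 : Nat) : Int)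
      ((PySem.List.pyGetD ua ((r2 : Nat) : Int) (0, 0)).1, (PySem.List.pyGetD ua ((r1 : Nat) : Int) (0, 0)).2) =
      ua.set r1 (((r2 : Nat) : Int), (ua[r1]?.getD (0, 0)).2) := by
    rw [pvSetD_wrap ua _ _ hlen (by omega) (by exact_mod_cast h1), hid1, hg2, hc2, hg1]
  set ua1 := ua.set r1 (((r2 : Nat) : Int), (ua[r1]?.getD (0, 0)).2) with hua1
  have hlen1 : ua1.length = 200001 := by rw [hua1]; simp [hlen]
  have hpn1 : pnat ua1 = Function.update (pnat ua) r1 r2 := by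
    rw [hua1, pnat_set ua r1 _ (by omega)]
    simp
  have hra1 : ∀ i : Nat, i < 200001 → 0 ≤ (ua1[i]?.getD (0, 0)).1 ∧ (ua1[i]?.getD (0, 0)).1 < 200001 := by
    rw [hua1]
    exact pvSet_ranges hlen hInv.2.1 h1 (by simp) (by simpa using h2)
  have hcell2' : ua1[r2]?.getD (0, 0) = ua[r2]?.getD (0, 0) := by
    rw [hua1, List.getElem?_set, if_neg hne]
  have hres : unionOpA ua ((r1 : Nat) : Int) ((r2 : Nat) : Int) =
      ua1.set r2 ((ua1[r2]?.getD (0, 0)).1,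
        (ua1[r2]?.getD (0, 0)).2 + (ua1[r1]?.getD (0, 0)).2) := by
    show PySem.List.pySetD (PySem.List.pySetD ua ((r1 : Nat) : Int)
        ((PySem.List.pyGetD ua ((r2 : Nat) : Int) (0, 0)).1, (PySem.List.pyGetD ua ((r1 : Nat) : Int) (0, 0)).2)) ((r2 : Nat) : Int) _ = _
    rw [hstep1]
    rw [pvSetD_wrap ua1 _ _ hlen1 (by omega) (by exact_mod_cast h2), hid2]
    rw [pvGetD_wrap ua1 _ _ hlen1 (by omega) (by exact_mod_cast h2), hid2]
    rw [pvGetD_wrap ua1 _ _ hlen1 (by omega) (by exact_mod_cast h1), hid1]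
  have hpnR : pnat (unionOpA ua ((r1 : Nat) : Int) ((r2 : Nat) : Int)) =
      Function.update (pnat ua) r1 r2 := by
    rw [hres, pnat_set ua1 r2 _ (by omega), hpn1]
    have hv : ((ua1[r2]?.getD (0, 0)).1).toNat = r2 := by rw [hcell2', hc2]; omega
    rw [hv]
    funext i
    by_cases hir2 : i = r2
    · subst hir2
      simp [Function.update]
      exact fun _ => hf2.symm
    · simp [Function.update, hir2]
  have hlenR : (unionOpA ua ((r1 : Nat) : Int) ((r2 : Nat) : Int)).length = 200001 := by
    rw [hres]; simp [hlen1]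
  have hraR : ∀ i : Nat, i < 200001 →
      0 ≤ ((unionOpA ua ((r1 : Nat) : Int) ((r2 : Nat) : Int))[i]?.getD (0, 0)).1 ∧
        ((unionOpA ua ((r1 : Nat) : Int) ((r2 : Nat) : Int))[i]?.getD (0, 0)).1 < 200001 := by
    rw [hres]
    refine pvSet_ranges hlen1 hra1 h2 ?_ ?_
    · have := hra1 r2 h2; omega
    · have := hra1 r2 h2; omega
  refine ⟨⟨hlenR, hraR, ?_⟩, ?_⟩
  · intro i hi
    obtain ⟨rr, m, hm⟩ := hInv.2.2 i hi
    obtain ⟨m', hm'⟩ := pvRR_link hf1 hf2 hne i rr m hm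
    exact ⟨if rr = r1 then r2 else rr, m', by rw [hpnR]; exact hm'⟩
  · intro i rr m hm
    obtain ⟨m', hm'⟩ := pvRR_link hf1 hf2 hne i rr m hm
    exact ⟨m', by rw [hpnR]; exact hm'⟩

-- Dict facts specific to the two programs
theorem pvContains_of_mem_keys {d : PySem.Dict Int Int} {k : Int} (h : k ∈ d.keys) :
    d.contains k = true := (PySem.Dict.contains_iff_mem_keys d k).mpr h

theorem pvGetD_mem_values {d : PySem.Dict Int Int} {k : Int} (h : d.contains k = true) :
    d.getD k 0 ∈ d.values := by
  have hsome : (d.items.find? (fun p => p.1 == k)).isSome :=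
    List.find?_isSome.mpr (by simpa [PySem.Dict.contains, List.any_eq_true] using h)
  obtain ⟨p, hp⟩ := Option.isSome_iff_exists.mp hsome
  have hmem := List.mem_of_find?_eq_some hp
  have hgd : d.getD k 0 = p.2 := by
    unfold PySem.Dict.getD PySem.Dict.get?
    rw [hp]
    rfl
  rw [hgd]
  exact List.mem_map_of_mem hmem

def labD (lbl : PySem.Dict Int Int) (v : Int) : Int := lbl.getD v v

theorem pvRelabel_get? (lbl : PySem.Dict Int Int) (u w v : Int) :
    (PySem.Dict.mk (lbl.items.map (fun p => if p.2 = u then (p.1, w) else p))).get? v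
      = (lbl.get? v).map (fun z => if z = u then w else z) := by
  unfold PySem.Dict.get?
  rw [List.find?_map]
  have hpred : ((fun p : Int × Int => p.1 == v) ∘ (fun p => if p.2 = u then (p.1, w) else p))
      = (fun p : Int × Int => p.1 == v) := by
    funext p
    by_cases hp : p.2 = u <;> simp [hp]
  rw [hpred]
  cases hfind : lbl.items.find? (fun p => p.1 == v) with
  | none => rfl
  | some p => by_cases hp : p.2 = u <;> simp [hp]

theorem pvRelabel_getD (lbl : PySem.Dict Int Int) (u w v : Int) (hu : labD lbl u = u) :
    labD (relabelB lbl u w) v = if labD lbl v = u then w else labD lbl v := by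
  unfold labD relabelB
  rw [PySem.Dict.getD_insert]
  by_cases hvu : v = u
  · subst hvu
    unfold labD at hu
    rw [hu]
    simp
  · rw [if_neg hvu]
    unfold PySem.Dict.getD
    rw [pvRelabel_get?]
    cases hq : lbl.get? v with
    | none => simp [hvu]
    | some z => by_cases hz : z = u <;> simp [hz]

theorem pvRelabel_nodup {lbl : PySem.Dict Int Int} (h : lbl.keys.Nodup) (u w : Int) :
    (relabelB lbl u w).keys.Nodup := by
  unfold relabelB
  refine PySem.Dict.nodup_keys_insert _ _ _ ?_
  have hkeys : (PySem.Dict.mk (lbl.items.map (fun p => if p.2 = u then (p.1, w) else p))).keys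
      = lbl.keys := by
    unfold PySem.Dict.keys
    rw [List.map_map]
    refine List.map_congr_left ?_
    intro p _
    by_cases hp : p.2 = u <;> simp [hp]
  rw [hkeys]
  exact h

theorem pvPsi_eq_of_idx {v w : Int} (hv1 : -200001 ≤ v) (hv2 : v ≤ 200000)
    (hw1 : -200001 ≤ w) (hw2 : w ≤ 200000) (h : pvIdxN v = pvIdxN w) : psiV v = psiV w := by
  unfold pvIdxN psiV at *
  split_ifs at * <;> omega

-- the simulation relation between A's union-find state and B's label dictionary
def pvSim (d : PySem.Dict Int Int) (st : List (Int × Int) × Int)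
    (tt : PySem.Dict Int Int × Int) : Prop :=
  pvInv st.1 ∧ st.2 = tt.2 ∧ tt.1.keys.Nodup ∧
  (∀ v ∈ d.values, labD tt.1 v ∈ d.values) ∧
  (∀ v ∈ d.values, ∃ m, pvRR (pnat st.1) (pvIdxN v) (pvIdxN (labD tt.1 v)) m)

theorem pvStep (d : PySem.Dict Int Int)
    (hval : ∀ v ∈ d.values, -200001 ≤ v ∧ v ≤ 200000)
    (hinj : ∀ v ∈ d.values, ∀ w ∈ d.values, psiV v = psiV w → v = w)
    (i : Int) (hi : i ∈ d.keys) (j : Int)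
    {st : List (Int × Int) × Int} {tt : PySem.Dict Int Int × Int}
    (hS : pvSim d st tt) : pvSim d (bigStepA d i st j) (bigStepB d i tt j) := by
  obtain ⟨hInv, hcnt, hnd, hlv, hrel⟩ := hS
  simp only [bigStepA, bigStepB]
  by_cases hc : d.contains (PySem.Int.bxor i j) = true
  · rw [if_pos hc, if_pos hc]
    set v1 := d.getD i 0 with hv1def
    set v2 := d.getD (PySem.Int.bxor i j) 0 with hv2def
    have hv1m : v1 ∈ d.values := pvGetD_mem_values (pvContains_of_mem_keys hi)
    have hv2m : v2 ∈ d.values := pvGetD_mem_values hc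
    set u := labD tt.1 v1 with hudef
    set w := labD tt.1 v2 with hwdef
    have hum : u ∈ d.values := hlv v1 hv1m
    have hwm : w ∈ d.values := hlv v2 hv2m
    have rv1 := hval v1 hv1m
    have rv2 := hval v2 hv2m
    have ru := hval u hum
    have rw' := hval w hwm
    have hUu : pvIdxN u < 200001 := pvIdxN_lt ru.1 (by omega)
    have hUw : pvIdxN w < 200001 := pvIdxN_lt rw'.1 (by omega)
    obtain ⟨m1, hRR1⟩ := hrel v1 hv1m
    obtain ⟨m2, hRR2⟩ := hrel v2 hv2m
    obtain ⟨hUF1r, hUF1inv, hUF1T⟩ := pvUF st.1 hInv v1 rv1.1 (by omega) hRR1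
    obtain ⟨m2', hRR2'⟩ := hUF1T _ _ _ hRR2
    obtain ⟨hUF2r, hUF2inv, hUF2T⟩ := pvUF (unionFindA st.1 v1).1 hUF1inv v2 rv2.1 (by omega) hRR2'
    obtain ⟨m1', hRR1'⟩ := hUF1T _ _ _ hRR1
    obtain ⟨m1'', hRR1''⟩ := hUF2T _ _ _ hRR1'
    obtain ⟨m2'', hRR2''⟩ := hUF2T _ _ _ hRR2'
    set uaB := (unionFindA (unionFindA st.1 v1).1 v2).1 with huaB
    have hfixu : pnat uaB (pvIdxN u) = pvIdxN u := pvRR_fix hRR1''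
    have hfixw : pnat uaB (pvIdxN w) = pvIdxN w := pvRR_fix hRR2''
    have hlenB : uaB.length = 200001 := hUF2inv.1
    have hcell : ∀ r : Nat, r < 200001 → pnat uaB r = r →
        PySem.List.pyGetD uaB ((r : Nat) : Int) (0, 0) = (((r : Nat) : Int), (uaB[r]?.getD (0, 0)).2) := by
      intro r hr hfix
      rw [pvGetD_wrap uaB _ _ hlenB (by omega) (by exact_mod_cast hr)]
      have hidr : pvIdxN ((r : Nat) : Int) = r := by unfold pvIdxN psiV; split_ifs <;> omega
      rw [hidr]
      have := pvCell1 hUF2inv hr hfix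
      exact Prod.ext this rfl
    rw [hUF1r, hUF2r]
    have hgdu : tt.1.getD v1 v1 = u := hudef.symm
    have hgdw : tt.1.getD v2 v2 = w := hwdef.symm
    rw [← hudef, ← hwdef, hgdu, hgdw]
    -- the transported relation after both finds, for every value
    have hrelB : ∀ v ∈ d.values, ∃ m, pvRR (pnat uaB) (pvIdxN v) (pvIdxN (labD tt.1 v)) m := by
      intro v hv
      obtain ⟨m, hm⟩ := hrel v hv
      obtain ⟨ma, hma⟩ := hUF1T _ _ _ hm
      obtain ⟨mb, hmb⟩ := hUF2T _ _ _ hma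
      exact ⟨mb, hmb⟩
    by_cases hr : pvIdxN u = pvIdxN w
    · -- same root / same label: neither side changes anything but the compressed array
      have huw : u = w := hinj u hum w hwm (pvPsi_eq_of_idx ru.1 (by omega) rw'.1 (by omega) hr)
      rw [hr]
      rw [if_neg (by simp)]
      rw [if_neg (by simp [huw])]
      exact ⟨hUF2inv, hcnt, hnd, hlv, hrelB⟩
    · -- different roots / different labels: A links the roots, B relabels the class
      have hunw : u ≠ w := fun he => hr (by rw [he])
      have hne1 : PySem.List.pyGetD uaB ((pvIdxN u : Nat) : Int) (0, 0) ≠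
          PySem.List.pyGetD uaB ((pvIdxN w : Nat) : Int) (0, 0) := by
        rw [hcell _ hUu hfixu, hcell _ hUw hfixw]
        intro he
        have := congrArg Prod.fst he
        simp only at this
        exact hr (by exact_mod_cast this)
      rw [if_pos hne1, if_pos hunw]
      have hufix : labD tt.1 u = u := by
        obtain ⟨mu, hRRu⟩ := hrel u hum
        have hfix0 : pnat st.1 (pvIdxN u) = pvIdxN u := pvRR_fix hRR1
        have := (pvRR_det hRRu (pvRR.root _ hfix0)).1
        exact (hinj (labD tt.1 u) (hlv u hum) u hum
          (pvPsi_eq_of_idx (hval _ (hlv u hum)).1 (by have := hval _ (hlv u hum); omega) ru.1 (by omega) this))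
      obtain ⟨hUOinv, hUOT⟩ := pvUnionOp uaB hUF2inv hUu hUw hfixu hfixw hr
      refine ⟨hUOinv, by simp [hcnt], pvRelabel_nodup hnd u w, ?_, ?_⟩
      · intro v hv
        rw [pvRelabel_getD tt.1 u w v hufix]
        by_cases hlu : labD tt.1 v = u
        · rw [if_pos hlu]; exact hwm
        · rw [if_neg hlu]; exact hlv v hv
      · intro v hv
        obtain ⟨mb, hmb⟩ := hrelB v hv
        obtain ⟨mc, hmc⟩ := hUOT _ _ _ hmb
        refine ⟨mc, ?_⟩
        rw [pvRelabel_getD tt.1 u w v hufix]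
        by_cases hlu : labD tt.1 v = u
        · rw [if_pos hlu]
          have : pvIdxN (labD tt.1 v) = pvIdxN u := by rw [hlu]
          rw [if_pos this] at hmc
          exact hmc
        · rw [if_neg hlu]
          have hvm' : labD tt.1 v ∈ d.values := hlv v hv
          have : pvIdxN (labD tt.1 v) ≠ pvIdxN u := by
            intro he
            exact hlu (hinj (labD tt.1 v) hvm' u hum
              (pvPsi_eq_of_idx (hval _ hvm').1 (by have := hval _ hvm'; omega) ru.1 (by omega) he))
          rw [if_neg this] at hmc
          exact hmc
  · rw [if_neg hc, if_neg hc]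
    exact ⟨hInv, hcnt, hnd, hlv, hrel⟩

-- named pieces of the two ports (definitionally equal to the let-bound values inside them)
def pvM1 : List Int := (PySem.List.pyRange 0 24 1).map (fun i => (1 : Int) <<< i.toNat)
def pvM2A : List Int :=
  pvM1.foldl (fun acc i => pvM1.foldl (fun acc j => acc ++ [PySem.Int.bxor i j]) acc) []
def pvM2B : List Int := pvM1.flatMap (fun i => pvM1.map (fun j => PySem.Int.bxor i j))
def pvUA0 : List (Int × Int) := (PySem.List.pyRange 0 (200000 + 1) 1).map (fun i => (i, (1 : Int)))

theorem big_cluster_eq (A : List (Int × Int)) :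
    big_cluster A = (((⟨A⟩ : PySem.Dict Int Int).keys.foldl
      (fun st i => pvM2A.foldl (bigStepA ⟨A⟩ i) (pvM1.foldl (bigStepA ⟨A⟩ i) st))
      (pvUA0, (A.length : Int)))).2 := rfl

theorem big_cluster_alt_eq (A : List (Int × Int)) :
    big_cluster_alt A = (((⟨A⟩ : PySem.Dict Int Int).keys.foldl
      (fun st i => (pvM1 ++ pvM2B).foldl (bigStepB ⟨A⟩ i) st)
      (PySem.Dict.empty, (A.length : Int)))).2 := rfl

theorem pvM2_eq : pvM2A = pvM2B := by
  unfold pvM2A pvM2B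
  rw [PySem.List.foldl_congr_mem pvM1 _ (fun acc i => acc ++ pvM1.map (fun j => PySem.Int.bxor i j)) []
    (fun acc i _ => PySem.List.foldl_append_singleton_eq_map _ pvM1 acc)]
  rw [PySem.List.foldl_append_eq_flatMap]
  simp

theorem pvFoldRel {α β γ : Type} (R : α → β → Prop) (f : α → γ → α) (g : β → γ → β)
    (l : List γ) (h : ∀ a b x, x ∈ l → R a b → R (f a x) (g b x)) :
    ∀ a b, R a b → R (l.foldl f a) (l.foldl g b) := by
  induction l with
  | nil => intro a b hR; simpa using hR
  | cons x xs ih =>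
    intro a b hR
    simp only [List.foldl_cons]
    exact ih (fun a b y hy => h a b y (List.mem_cons_of_mem _ hy)) _ _
      (h a b x List.mem_cons_self hR)

set_option maxRecDepth 4000 in
theorem pvInit (d : PySem.Dict Int Int)
    (hval : ∀ v ∈ d.values, -200001 ≤ v ∧ v ≤ 200000) (c : Int) :
    pvSim d (pvUA0, c) (PySem.Dict.empty, c) := by
  have hlen0 : pvUA0.length = 200001 := by
    unfold pvUA0
    rw [List.length_map, PySem.List.length_pyRange_one]
    rfl
  have hcell : ∀ i : Nat, i < 200001 → pvUA0[i]? = some (((i : Nat) : Int), 1) := by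
    intro i hi
    unfold pvUA0
    rw [List.getElem?_map, PySem.List.getElem?_pyRange_one]
    rw [if_pos (by norm_num; omega)]
    simp
  have hpn0 : ∀ i : Nat, i < 200001 → pnat pvUA0 i = i := by
    intro i hi
    unfold pnat
    rw [hcell i hi]
    simp
  have hInv0 : pvInv pvUA0 := by
    refine ⟨hlen0, ?_, ?_⟩
    · intro i hi
      rw [hcell i hi]
      simp
      omega
    · intro i hi
      exact ⟨i, 0, pvRR.root i (hpn0 i hi)⟩
  unfold pvSim
  dsimp only
  refine ⟨hInv0, rfl, ?_, ?_, ?_⟩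
  · show (List.map Prod.fst ([] : List (Int × Int))).Nodup
    simp
  · intro v hv
    simpa [labD, PySem.Dict.getD_empty] using hv
  · intro v hv
    have hl : labD PySem.Dict.empty v = v := by simp [labD, PySem.Dict.getD_empty]
    rw [hl]
    have := hval v hv
    exact ⟨0, pvRR.root _ (hpn0 _ (pvIdxN_lt this.1 (by omega)))⟩

-- ===== VERDICT (by name: the statement is the Claim_ definition above) =====
theorem big_cluster_spec : Claim_equal_big_cluster := by
  unfold Claim_equal_big_cluster
  intro A _ hPre
  unfold Spec_big_cluster
  obtain ⟨_, hvals, hinj0⟩ := hPre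
  have hval : ∀ v ∈ (⟨A⟩ : PySem.Dict Int Int).values, -200001 ≤ v ∧ v ≤ 200000 := by
    intro v hv
    obtain ⟨p, hp, rfl⟩ := List.mem_map.mp hv
    exact hvals p hp
  have hinj : ∀ v ∈ (⟨A⟩ : PySem.Dict Int Int).values, ∀ w ∈ (⟨A⟩ : PySem.Dict Int Int).values,
      psiV v = psiV w → v = w := by
    intro v hv w hw h
    obtain ⟨p, hp, rfl⟩ := List.mem_map.mp hv
    obtain ⟨q, hq, rfl⟩ := List.mem_map.mp hw
    exact hinj0 p hp q hq h
  rw [big_cluster_eq, big_cluster_alt_eq]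
  have hkey : pvSim ⟨A⟩
      ((⟨A⟩ : PySem.Dict Int Int).keys.foldl
        (fun st i => pvM2A.foldl (bigStepA ⟨A⟩ i) (pvM1.foldl (bigStepA ⟨A⟩ i) st))
        (pvUA0, (A.length : Int)))
      ((⟨A⟩ : PySem.Dict Int Int).keys.foldl
        (fun st i => (pvM1 ++ pvM2B).foldl (bigStepB ⟨A⟩ i) st)
        (PySem.Dict.empty, (A.length : Int))) := by
    refine pvFoldRel (pvSim ⟨A⟩) _ _ _ ?_ _ _ (pvInit ⟨A⟩ hval (A.length : Int))
    intro st tt x hx hR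
    rw [List.foldl_append, ← pvM2_eq]
    refine pvFoldRel (pvSim ⟨A⟩) _ _ pvM2A (fun a b y _ hRy => pvStep ⟨A⟩ hval hinj x hx y hRy) _ _ ?_
    exact pvFoldRel (pvSim ⟨A⟩) _ _ pvM1 (fun a b y _ hRy => pvStep ⟨A⟩ hval hinj x hx y hRy) _ _ hR
  exact hkey.2.1
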